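-- pv_equiv track=rewrite | github.com/NobuyukiInoue/LeetCode | Problems/2200_2299/2231_Largest_Number_After_Digit_Swaps_by_Parity/Project_Python3/Largest_Number_After_Digit_Swaps_by_Parity.py | largestInteger_heapq
-- ===== SOURCE A (Python) =====
-- import heapq
--
-- def largestInteger_heapq(num: int) -> int:
--     # 31ms - 49ms
--     len_num = len(str(num))
--     arr = [int(n) for n in str(num)]
--     odd, even = [], []
--     for n in arr:
--         if n & 1:
--             heapq.heappush(odd, n)
--         else:
--             heapq.heappush(even, n)
--     res, col = 0,  1
--     for i in range(len_num - 1, -1, -1):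
--         if arr[i] & 1:
--             res += heapq.heappop(odd)*col
--         else:
--             res += heapq.heappop(even)*col
--         col *= 10
--     return res
-- ===== SOURCE B (Python) =====
-- def largestInteger_heapq(num: int) -> int:
--     # one sort per parity + index pointers, MSB-first accumulation (no heaps)
--     digits = [int(c) for c in str(num)]
--     evens = sorted((d for d in digits if d % 2 == 0), reverse=True)
--     odds = sorted((d for d in digits if d % 2 == 1), reverse=True)
--     res = ei = oi = 0
--     for d in digits:
--         if d % 2 == 1:
--             res = res * 10 + odds[oi]
--             oi += 1
--         else:
--             res = res * 10 + evens[ei]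
--             ei += 1
--     return res
-- ===== Notes on version B (the rewrite author's own statement) =====
-- stated objective: simpler
-- what changed: Replaces the two binary min-heaps with per-position heappop and a little-endian column multiplier by one descending sort per parity plus two index pointers walked left-to-right with MSB-first decimal accumulation.
import Mathlib
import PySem

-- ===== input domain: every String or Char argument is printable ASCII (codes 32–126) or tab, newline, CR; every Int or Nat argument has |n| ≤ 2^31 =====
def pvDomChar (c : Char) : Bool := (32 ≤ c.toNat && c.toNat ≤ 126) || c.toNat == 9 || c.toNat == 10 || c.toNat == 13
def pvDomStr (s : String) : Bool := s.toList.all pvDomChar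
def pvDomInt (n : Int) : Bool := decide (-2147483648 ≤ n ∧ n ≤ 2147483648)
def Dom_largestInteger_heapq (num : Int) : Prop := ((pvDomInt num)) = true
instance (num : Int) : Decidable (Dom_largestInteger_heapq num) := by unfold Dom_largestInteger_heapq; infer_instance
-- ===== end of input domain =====

-- B replaces A's two binary min-heaps (heapq push/pop per position, little-endian column
-- multiplier) by one descending sort per parity plus index pointers walked left-to-right
-- with MSB-first accumulation; objective: simpler (same asymptotic cost).

-- ===== PORT A =====
def pvSd (heap : List Int) (pos : Nat) (newitem : Int) : List Int :=
  if _h : 0 < pos then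
    if newitem < heap.getD ((pos - 1) / 2) 0 then
      pvSd (heap.set pos (heap.getD ((pos - 1) / 2) 0)) ((pos - 1) / 2) newitem
    else heap.set pos newitem
  else heap.set pos newitem
termination_by pos
decreasing_by omega

def pvSu (heap : List Int) (pos : Nat) (newitem : Int) : List Int :=
  if _h : 2 * pos + 1 < heap.length then
    if _h2 : 2 * pos + 2 < heap.length ∧ ¬ heap.getD (2 * pos + 1) 0 < heap.getD (2 * pos + 2) 0 then
      pvSu (heap.set pos (heap.getD (2 * pos + 2) 0)) (2 * pos + 2) newitem
    else
      pvSu (heap.set pos (heap.getD (2 * pos + 1) 0)) (2 * pos + 1) newitem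
  else pvSd (heap.set pos newitem) pos newitem
termination_by heap.length - pos
decreasing_by
  · simp only [List.length_set]; omega
  · simp only [List.length_set]; omega

def pvHeappush (heap : List Int) (item : Int) : List Int :=
  pvSd (heap ++ [item]) heap.length item

def pvHeappop (heap : List Int) : Int × List Int :=
  match heap.getLast? with
  | none => (0, [])
  | some lastelt =>
    let rest := heap.dropLast
    if rest.isEmpty then (lastelt, rest)
    else (rest.getD 0 0, pvSu (rest.set 0 lastelt) 0 lastelt)

def pvDigits (num : Int) : List Int :=
  (PySem.Int.toStr num).toList.map (fun c => ((c.toNat : Int) - 48))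

def pvBuildStep (p : List Int × List Int) (n : Int) : List Int × List Int :=
  if PySem.Int.band n 1 ≠ 0 then (pvHeappush p.1 n, p.2) else (p.1, pvHeappush p.2 n)

def pvStepA (s : (List Int × List Int) × Int × Int) (d : Int) : (List Int × List Int) × Int × Int :=
  if PySem.Int.band d 1 ≠ 0 then
    (((pvHeappop s.1.1).2, s.1.2), s.2.1 + (pvHeappop s.1.1).1 * s.2.2, s.2.2 * 10)
  else ((s.1.1, (pvHeappop s.1.2).2), s.2.1 + (pvHeappop s.1.2).1 * s.2.2, s.2.2 * 10)

def largestInteger_heapq (num : Int) : Int :=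
  let len_num := PySem.Str.len (PySem.Int.toStr num)
  let arr := pvDigits num
  let oe := arr.foldl pvBuildStep ([], [])
  let st := (PySem.List.pyRange (len_num - 1) (-1) (-1)).foldl
      (fun s i => pvStepA s (PySem.List.pyGetD arr i 0)) ((oe.1, oe.2), 0, 1)
  st.2.1


-- ===== PORT B =====
def pvStepB (odds evens : List Int) (s : Int × Int × Int) (d : Int) : Int × Int × Int :=
  if PySem.Int.mod d 2 == 1 then (s.1 * 10 + PySem.List.pyGetD odds s.2.2 0, s.2.1, s.2.2 + 1)
  else (s.1 * 10 + PySem.List.pyGetD evens s.2.1 0, s.2.1 + 1, s.2.2)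

def largestInteger_heapq_alt (num : Int) : Int :=
  let digits := pvDigits num
  let evens := PySem.List.sorted (digits.filter (fun d => PySem.Int.mod d 2 == 0)) (fun x => x) true
  let odds := PySem.List.sorted (digits.filter (fun d => PySem.Int.mod d 2 == 1)) (fun x => x) true
  (digits.foldl (pvStepB odds evens) (0, 0, 0)).1

-- ===== PRECONDITION & SPEC =====
-- Pre_ excludes exactly the negative inputs: there str(num) contains '-', so int('-')
-- raises ValueError in A (and likewise in B); on every nonnegative num A returns normally.
def Pre_largestInteger_heapq (num : Int) : Prop := 0 ≤ num
instance (num : Int) : Decidable (Pre_largestInteger_heapq num) := by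
  unfold Pre_largestInteger_heapq; infer_instance
def pvWitness_largestInteger_heapq : Int := (1234)

def Spec_largestInteger_heapq (num : Int) (out : Int) : Prop := out = largestInteger_heapq_alt num
instance (num : Int) (out : Int) : Decidable (Spec_largestInteger_heapq num out) := by unfold Spec_largestInteger_heapq; infer_instance

-- ===== CLAIM (what is proved, stated in full; the proofs are below) =====
def Claim_equal_largestInteger_heapq : Prop := ∀ (num : Int), Dom_largestInteger_heapq num → Pre_largestInteger_heapq num → Spec_largestInteger_heapq num (largestInteger_heapq num)

-- ===== LEMMAS AND PROOFS =====

def pvOddD (d : Int) : Bool := PySem.Int.mod d 2 == 1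

def pvPick : List Int → List Int → List Int → List Int
  | [], _, _ => []
  | d :: t, os, es =>
    if pvOddD d then os.headI :: pvPick t os.tail es else es.headI :: pvPick t os es.tail

def pvRev10 : List Int → Int
  | [] => 0
  | d :: t => d + 10 * pvRev10 t

def pvIsHeap (l : List Int) : Prop :=
  ∀ j, 0 < j → j < l.length → l.getD ((j - 1) / 2) 0 ≤ l.getD j 0

def pvHorner (l : List Int) (r : Int) : Int := l.foldl (fun a d => a * 10 + d) r

theorem pv_eraseIdx_set_perm (l : List Int) (i j : Nat) (hij : i ≠ j)
    (hi : i < l.length) (hj : j < l.length) :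
    ((l.set i (l.getD j 0)).eraseIdx j).Perm (l.eraseIdx i) := by
  have h1 : (l.set i (l.getD j 0)).Perm (l.getD j 0 :: l.eraseIdx i) :=
    List.set_perm_cons_eraseIdx hi (l.getD j 0)
  have hj' : j < (l.set i (l.getD j 0)).length := by simpa using hj
  have h2 : (l.set i (l.getD j 0)).Perm
      ((l.set i (l.getD j 0)).getD j 0 :: (l.set i (l.getD j 0)).eraseIdx j) := by
    have h3 := List.getElem_cons_eraseIdx_perm (l := l.set i (l.getD j 0)) (n := j) hj'
    rw [List.getD_eq_getElem _ _ hj']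
    exact h3.symm
  have hg : (l.set i (l.getD j 0)).getD j 0 = l.getD j 0 := by
    rw [List.getD_eq_getElem _ _ hj', List.getElem_set_ne (by simpa using hij.symm ∘ Eq.symm) ]
    · exact (List.getD_eq_getElem _ _ hj).symm
  rw [hg] at h2
  exact (h2.symm.trans h1).cons_inv

theorem pvSd_perm (heap : List Int) (pos : Nat) (x : Int) (hpos : pos < heap.length) :
    (pvSd heap pos x).Perm (x :: heap.eraseIdx pos) := by
  fun_induction pvSd heap pos x with
  | case1 heap pos h hlt ih =>
    have hpp : (pos - 1) / 2 < heap.length := by omega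
    have step := ih (by simpa using hpp)
    exact step.trans (List.Perm.cons _
      (pv_eraseIdx_set_perm heap pos ((pos - 1) / 2) (by omega) hpos hpp))
  | case2 heap pos h hlt => exact List.set_perm_cons_eraseIdx hpos x
  | case3 heap pos h => exact List.set_perm_cons_eraseIdx hpos x

theorem pv_eraseIdx_set_self (l : List Int) (i : Nat) (a : Int) :
    (l.set i a).eraseIdx i = l.eraseIdx i := by
  induction l generalizing i with
  | nil => simp
  | cons y t ih => cases i <;> simp [ih]

theorem pvSu_perm (heap : List Int) (pos : Nat) (x : Int) (hpos : pos < heap.length) :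
    (pvSu heap pos x).Perm (x :: heap.eraseIdx pos) := by
  fun_induction pvSu heap pos x with
  | case1 heap pos h h2 ih =>
    have hcp : 2 * pos + 2 < heap.length := h2.1
    have step := ih (by simpa using hcp)
    exact step.trans (List.Perm.cons _
      (pv_eraseIdx_set_perm heap pos (2 * pos + 2) (by omega) hpos hcp))
  | case2 heap pos h h2 ih =>
    have step := ih (by simpa using h)
    exact step.trans (List.Perm.cons _
      (pv_eraseIdx_set_perm heap pos (2 * pos + 1) (by omega) hpos h))
  | case3 heap pos h =>
    have := pvSd_perm (heap.set pos x) pos x (by simpa using hpos)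
    rwa [pv_eraseIdx_set_self] at this

theorem pv_getD_set_self (l : List Int) (i : Nat) (a : Int) (h : i < l.length) :
    (l.set i a).getD i 0 = a := by
  rw [List.getD_eq_getElem _ _ (by simpa using h)]
  simp [List.getElem_set_self]

theorem pv_getD_set_ne (l : List Int) (i j : Nat) (a : Int) (h : j ≠ i) :
    (l.set i a).getD j 0 = l.getD j 0 := by
  by_cases hj : j < l.length
  · rw [List.getD_eq_getElem _ _ (by simpa using hj), List.getD_eq_getElem _ _ hj]
    exact List.getElem_set_ne (i := i) (j := j) (by omega) _
  · rw [List.getD_eq_default _ _ (by simpa using (not_lt.mp hj)),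
        List.getD_eq_default _ _ (not_lt.mp hj)]

theorem pvSd_heap (heap : List Int) (pos : Nat) (x : Int) (hpos : pos < heap.length)
    (Ha : ∀ j, 0 < j → j < heap.length → j ≠ pos → (j - 1) / 2 ≠ pos →
      heap.getD ((j - 1) / 2) 0 ≤ heap.getD j 0)
    (Hb : ∀ j, 0 < j → j < heap.length → (j - 1) / 2 = pos → x ≤ heap.getD j 0)
    (Hc : ∀ j, 0 < j → j < heap.length → (j - 1) / 2 = pos → 0 < pos →
      heap.getD ((pos - 1) / 2) 0 ≤ heap.getD j 0) :
    pvIsHeap (pvSd heap pos x) := by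
  fun_induction pvSd heap pos x with
  | case1 heap pos h hlt ih =>
    have hpp : (pos - 1) / 2 < heap.length := by omega
    apply ih
    · simpa using hpp
    · -- Ha'
      intro j hj0 hjlen hne hpne
      simp only [List.length_set] at hjlen
      have hjpos : j ≠ pos := by omega
      rw [pv_getD_set_ne _ _ _ _ hjpos]
      by_cases hp : (j - 1) / 2 = pos
      · rw [hp, pv_getD_set_self _ _ _ hpos]
        exact Hc j hj0 hjlen hp h
      · rw [pv_getD_set_ne _ _ _ _ hp]
        exact Ha j hj0 hjlen hjpos hp
    · -- Hb'
      intro j hj0 hjlen hp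
      simp only [List.length_set] at hjlen
      by_cases hjpos : j = pos
      · subst hjpos; rw [pv_getD_set_self _ _ _ hpos]; exact le_of_lt hlt
      · rw [pv_getD_set_ne _ _ _ _ hjpos]
        have := Ha j hj0 hjlen hjpos (by omega)
        rw [hp] at this
        exact le_trans (le_of_lt hlt) this
    · -- Hc'
      intro j hj0 hjlen hp hpp0
      simp only [List.length_set] at hjlen
      have hgpne : ((pos - 1) / 2 - 1) / 2 ≠ pos := by omega
      rw [pv_getD_set_ne _ _ _ _ hgpne]
      have hppne : (pos - 1) / 2 ≠ pos := by omega
      have hgp : heap.getD (((pos - 1) / 2 - 1) / 2) 0 ≤ heap.getD ((pos - 1) / 2) 0 :=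
        Ha ((pos - 1) / 2) hpp0 hpp hppne (by omega)
      by_cases hjpos : j = pos
      · subst hjpos; rw [pv_getD_set_self _ _ _ hpos]; exact hgp
      · rw [pv_getD_set_ne _ _ _ _ hjpos]
        have := Ha j hj0 hjlen hjpos (by omega)
        rw [hp] at this
        exact le_trans hgp this
  | case2 heap pos h hlt =>
    intro j hj0 hjlen
    simp only [List.length_set] at hjlen
    by_cases hjpos : j = pos
    · subst hjpos
      rw [pv_getD_set_self _ _ _ hpos, pv_getD_set_ne _ _ _ _ (by omega)]
      exact not_lt.mp hlt
    · rw [pv_getD_set_ne _ _ _ _ hjpos]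
      by_cases hp : (j - 1) / 2 = pos
      · rw [hp, pv_getD_set_self _ _ _ hpos]
        exact Hb j hj0 hjlen hp
      · rw [pv_getD_set_ne _ _ _ _ hp]
        exact Ha j hj0 hjlen hjpos hp
  | case3 heap pos h =>
    intro j hj0 hjlen
    simp only [List.length_set] at hjlen
    have hjpos : j ≠ pos := by omega
    rw [pv_getD_set_ne _ _ _ _ hjpos]
    by_cases hp : (j - 1) / 2 = pos
    · rw [hp, pv_getD_set_self _ _ _ hpos]
      exact Hb j hj0 hjlen hp
    · rw [pv_getD_set_ne _ _ _ _ hp]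
      exact Ha j hj0 hjlen hjpos hp

theorem pvSu_heap (heap : List Int) (pos : Nat) (x : Int) (hpos : pos < heap.length)
    (Ha : ∀ j, 0 < j → j < heap.length → j ≠ pos → (j - 1) / 2 ≠ pos →
      heap.getD ((j - 1) / 2) 0 ≤ heap.getD j 0)
    (Hc : ∀ j, 0 < j → j < heap.length → (j - 1) / 2 = pos → 0 < pos →
      heap.getD ((pos - 1) / 2) 0 ≤ heap.getD j 0) :
    pvIsHeap (pvSu heap pos x) := by
  fun_induction pvSu heap pos x with
  | case1 heap pos h h2 ih =>
    have hcp : 2 * pos + 2 < heap.length := h2.1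
    apply ih
    · simpa using hcp
    · -- Ha'
      intro j hj0 hjlen hne hpne
      simp only [List.length_set] at hjlen
      by_cases hjpos : j = pos
      · rw [hjpos, pv_getD_set_ne _ _ _ _ (by omega), pv_getD_set_self _ _ _ hpos]
        exact Hc (2 * pos + 2) (by omega) hcp (by omega) (hjpos ▸ hj0)
      · rw [pv_getD_set_ne _ _ _ _ hjpos]
        by_cases hp : (j - 1) / 2 = pos
        · rw [hp, pv_getD_set_self _ _ _ hpos]
          have hj1 : j = 2 * pos + 1 := by omega
          subst hj1
          exact not_lt.mp h2.2
        · rw [pv_getD_set_ne _ _ _ _ hp]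
          exact Ha j hj0 hjlen hjpos hp
    · -- Hc'
      intro j hj0 hjlen hp _
      simp only [List.length_set] at hjlen
      have hgp : (2 * pos + 2 - 1) / 2 = pos := by omega
      rw [hgp, pv_getD_set_self _ _ _ hpos, pv_getD_set_ne _ _ _ _ (by omega)]
      have h5 := Ha j hj0 hjlen (by omega) (by omega)
      rwa [hp] at h5
  | case2 heap pos h h2 ih =>
    apply ih
    · simpa using h
    · -- Ha'
      intro j hj0 hjlen hne hpne
      simp only [List.length_set] at hjlen
      by_cases hjpos : j = pos
      · rw [hjpos, pv_getD_set_ne _ _ _ _ (by omega), pv_getD_set_self _ _ _ hpos]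
        exact Hc (2 * pos + 1) (by omega) h (by omega) (hjpos ▸ hj0)
      · rw [pv_getD_set_ne _ _ _ _ hjpos]
        by_cases hp : (j - 1) / 2 = pos
        · rw [hp, pv_getD_set_self _ _ _ hpos]
          have hj1 : j = 2 * pos + 2 := by omega
          subst hj1
          by_contra hc
          exact h2 ⟨hjlen, not_lt.mpr (le_of_lt (not_le.mp hc))⟩
        · rw [pv_getD_set_ne _ _ _ _ hp]
          exact Ha j hj0 hjlen hjpos hp
    · -- Hc'
      intro j hj0 hjlen hp _
      simp only [List.length_set] at hjlen
      have hgp : (2 * pos + 1 - 1) / 2 = pos := by omega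
      rw [hgp, pv_getD_set_self _ _ _ hpos, pv_getD_set_ne _ _ _ _ (by omega)]
      have h5 := Ha j hj0 hjlen (by omega) (by omega)
      rwa [hp] at h5
  | case3 heap pos h =>
    apply pvSd_heap (heap.set pos x) pos x (by simpa using hpos)
    · intro j hj0 hjlen hne hpne
      simp only [List.length_set] at hjlen
      rw [pv_getD_set_ne _ _ _ _ hne, pv_getD_set_ne _ _ _ _ hpne]
      exact Ha j hj0 hjlen hne hpne
    · intro j hj0 hjlen hp
      simp only [List.length_set] at hjlen
      omega
    · intro j hj0 hjlen hp _
      simp only [List.length_set] at hjlen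
      omega

theorem pv_getD_append_left (l m : List Int) (j : Nat) (h : j < l.length) :
    (l ++ m).getD j 0 = l.getD j 0 := by
  rw [List.getD_eq_getElem _ _ (by simp; omega), List.getD_eq_getElem _ _ h]
  exact List.getElem_append_left h

theorem pvHeappush_heap (h : List Int) (x : Int) (hh : pvIsHeap h) :
    pvIsHeap (pvHeappush h x) ∧ (pvHeappush h x).Perm (x :: h) := by
  have hlen : h.length < (h ++ [x]).length := by simp
  constructor
  · apply pvSd_heap _ _ _ hlen
    · intro j hj0 hjlen hne hpne
      simp only [List.length_append, List.length_cons, List.length_nil] at hjlen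
      have hj : j < h.length := by omega
      rw [pv_getD_append_left _ _ _ hj, pv_getD_append_left _ _ _ (by omega)]
      exact hh j hj0 hj
    · intro j hj0 hjlen hp
      simp only [List.length_append, List.length_cons, List.length_nil] at hjlen
      omega
    · intro j hj0 hjlen hp _
      simp only [List.length_append, List.length_cons, List.length_nil] at hjlen
      omega
  · have hperm := pvSd_perm (h ++ [x]) h.length x hlen
    have he : (h ++ [x]).eraseIdx h.length = h := by
      rw [List.eraseIdx_append_of_length_le (le_refl _)]
      simp
    rwa [he] at hperm

theorem pvRoot_min (h : List Int) (hh : pvIsHeap h) :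
    ∀ x ∈ h, h.getD 0 0 ≤ x := by
  have key : ∀ j, j < h.length → h.getD 0 0 ≤ h.getD j 0 := by
    intro j
    induction j using Nat.strong_induction_on with
    | _ j ih =>
      intro hj
      rcases Nat.eq_zero_or_pos j with h0 | h0
      · subst h0; exact le_refl _
      · exact le_trans (ih ((j - 1) / 2) (by omega) (by omega)) (hh j h0 hj)
  intro x hx
  obtain ⟨i, hi, rfl⟩ := List.mem_iff_getElem.mp hx
  have := key i hi
  rwa [List.getD_eq_getElem _ _ hi] at this

theorem pvHeappop_spec (h : List Int) (hh : pvIsHeap h) (hne : h ≠ []) :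
    (pvHeappop h).1 = h.getD 0 0 ∧ pvIsHeap (pvHeappop h).2 ∧
      h.Perm ((pvHeappop h).1 :: (pvHeappop h).2) := by
  have hgl : h.getLast? = some (h.getLast hne) := List.getLast?_eq_some_getLast hne
  have hlen0 : 0 < h.length := List.length_pos_iff.mpr hne
  by_cases h1 : h.length = 1
  · obtain ⟨a, rfl⟩ := List.length_eq_one_iff.mp h1
    refine ⟨rfl, ?_, ?_⟩
    · intro j hj0 hjlen
      simp [pvHeappop] at hjlen
    · simp [pvHeappop]
  · -- h.length ≥ 2
    have hlen2 : 2 ≤ h.length := by omega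
    set lastelt := h.getLast hne with hle
    have hrestlen : h.dropLast.length = h.length - 1 := List.length_dropLast
    have hrestne : ¬ h.dropLast.isEmpty := by
      rw [List.isEmpty_iff_length_eq_zero]; omega
    have hpop : pvHeappop h =
        (h.dropLast.getD 0 0, pvSu (h.dropLast.set 0 lastelt) 0 lastelt) := by
      rw [pvHeappop, hgl]
      simp only [Bool.not_eq_true] at hrestne
      simp [hrestne]
    have hget0 : h.dropLast.getD 0 0 = h.getD 0 0 := by
      rw [List.getD_eq_getElem _ _ (by omega), List.getD_eq_getElem _ _ hlen0]
      exact List.getElem_dropLast _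
    have hgetj : ∀ j, j < h.dropLast.length → h.dropLast.getD j 0 = h.getD j 0 := by
      intro j hj
      rw [List.getD_eq_getElem _ _ hj, List.getD_eq_getElem _ _ (by omega)]
      exact List.getElem_dropLast _
    have hsetlen : 0 < (h.dropLast.set 0 lastelt).length := by simp; omega
    refine ⟨by rw [hpop, hget0], ?_, ?_⟩
    · rw [hpop]
      apply pvSu_heap _ _ _ hsetlen
      · intro j hj0 hjlen hne' hpne
        simp only [List.length_set] at hjlen
        rw [pv_getD_set_ne _ _ _ _ hpne, pv_getD_set_ne _ _ _ _ hne',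
            hgetj _ hjlen, hgetj _ (by omega)]
        exact hh j hj0 (by omega)
      · intro j hj0 hjlen hp hfalse
        omega
    · rw [hpop]
      dsimp only
      rw [hget0]
      have hperm := pvSu_perm (h.dropLast.set 0 lastelt) 0 lastelt hsetlen
      have htail : (h.dropLast.set 0 lastelt).eraseIdx 0 = h.dropLast.tail := by
        cases h.dropLast with
        | nil => simp
        | cons a t => simp
      rw [htail] at hperm
      -- h = dropLast ++ [lastelt], dropLast = getD0 :: tail
      have hsplit : h.dropLast ++ [lastelt] = h := List.dropLast_append_getLast hne
      have hdne : h.dropLast ≠ [] := by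
        intro hc; rw [hc] at hrestlen; simp at hrestlen; omega
      have hcons : h.dropLast = h.getD 0 0 :: h.dropLast.tail := by
        rw [← hget0]
        cases hd : h.dropLast with
        | nil => exact absurd hd hdne
        | cons a t => simp
      have p1 : (h.dropLast.tail ++ [lastelt]).Perm (lastelt :: h.dropLast.tail) :=
        List.perm_append_singleton _ _
      have p2 : (h.dropLast.tail ++ [lastelt]).Perm
          (pvSu (h.dropLast.set 0 lastelt) 0 lastelt) := p1.trans hperm.symm
      have heq : h = h.getD 0 0 :: (h.dropLast.tail ++ [lastelt]) := by
        conv_lhs => rw [← hsplit, hcons]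
        rfl
      nth_rewrite 1 [heq]
      exact List.Perm.cons _ p2

theorem pvHeappop_sorted (h : List Int) (m : Int) (s : List Int) (hh : pvIsHeap h)
    (hp : h.Perm (m :: s)) (hs : (m :: s).Pairwise (· ≤ ·)) :
    (pvHeappop h).1 = m ∧ pvIsHeap (pvHeappop h).2 ∧ (pvHeappop h).2.Perm s := by
  have hne : h ≠ [] := by
    intro hc; subst hc; exact absurd hp.symm.eq_nil (by simp)
  obtain ⟨hv, hheap, hperm⟩ := pvHeappop_spec h hh hne
  have hvm : (pvHeappop h).1 = m := by
    have hmem : (pvHeappop h).1 ∈ h := by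
      rw [hv]
      rw [List.getD_eq_getElem _ _ (List.length_pos_iff.mpr hne)]
      exact List.getElem_mem _
    have hmemms : (pvHeappop h).1 ∈ m :: s := hp.mem_iff.mp hmem
    have h1 : m ≤ (pvHeappop h).1 := by
      rcases List.mem_cons.mp hmemms with hc | hc
      · rw [hc]
      · exact (List.pairwise_cons.mp hs).1 _ hc
    have h2 : (pvHeappop h).1 ≤ m := by
      rw [hv]
      exact pvRoot_min h hh m (hp.mem_iff.mpr (List.mem_cons_self))
    exact le_antisymm h2 h1
  refine ⟨hvm, hheap, ?_⟩
  have := (hperm.symm.trans hp)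
  rw [hvm] at this
  exact this.cons_inv

theorem pv_band_odd (d : Int) : (PySem.Int.band d 1 ≠ 0) ↔ pvOddD d = true := by
  rw [PySem.Int.band_one, pvOddD]
  rcases PySem.Int.mod_two_eq d with h | h <;> rw [h] <;> simp

theorem pvLoopA (t : List Int) (o e os es : List Int) (res col : Int)
    (Po : pvIsHeap o) (Pe : pvIsHeap e) (ho : o.Perm os) (he : e.Perm es)
    (so : os.Pairwise (· ≤ ·)) (se : es.Pairwise (· ≤ ·))
    (co : t.countP pvOddD = os.length) (ce : t.countP (fun d => !pvOddD d) = es.length) :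
    (t.foldl pvStepA ((o, e), res, col)).2.1 = res + col * pvRev10 (pvPick t os es) := by
  induction t generalizing o e os es res col with
  | nil => simp [pvPick, pvRev10]
  | cons d t ih =>
    rw [List.countP_cons] at co ce
    by_cases hodd : pvOddD d
    · have hco : t.countP pvOddD + 1 = os.length := by simpa [hodd] using co
      have hce : t.countP (fun d => !pvOddD d) = es.length := by simpa [hodd] using ce
      cases os with
      | nil => simp at hco
      | cons m s =>
        obtain ⟨hv, hheap, hperm⟩ := pvHeappop_sorted o m s Po ho so
        have hstep : pvStepA ((o, e), res, col) d =
            (((pvHeappop o).2, e), res + m * col, col * 10) := by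
          rw [pvStepA, if_pos (by rw [pv_band_odd]; exact hodd)]
          simp [hv]
        rw [List.foldl_cons, hstep,
          ih (pvHeappop o).2 e s es (res + m * col) (col * 10) hheap Pe hperm he
            (List.pairwise_cons.mp so).2 se (by simp only [List.length_cons] at hco; omega) hce]
        rw [pvPick, if_pos hodd]
        show res + m * col + col * 10 * pvRev10 (pvPick t s es) =
          res + col * pvRev10 (m :: pvPick t s es)
        rw [pvRev10]
        ring
    · have hco : t.countP pvOddD = os.length := by simpa [hodd] using co
      have hce : t.countP (fun d => !pvOddD d) + 1 = es.length := by simpa [hodd] using ce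
      cases es with
      | nil => simp at hce
      | cons m s =>
        obtain ⟨hv, hheap, hperm⟩ := pvHeappop_sorted e m s Pe he se
        have hstep : pvStepA ((o, e), res, col) d =
            ((o, (pvHeappop e).2), res + m * col, col * 10) := by
          rw [pvStepA, if_neg (by rw [pv_band_odd]; simpa using hodd)]
          simp [hv]
        rw [List.foldl_cons, hstep,
          ih o (pvHeappop e).2 os s (res + m * col) (col * 10) Po hheap ho hperm
            so (List.pairwise_cons.mp se).2 hco (by simp only [List.length_cons] at hce; omega)]
        rw [pvPick, if_neg hodd]
        show res + m * col + col * 10 * pvRev10 (pvPick t os s) =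
          res + col * pvRev10 (m :: pvPick t os s)
        rw [pvRev10]
        ring

theorem pvBuild (t : List Int) (o e : List Int) (Po : pvIsHeap o) (Pe : pvIsHeap e) :
    pvIsHeap (t.foldl pvBuildStep (o, e)).1 ∧ pvIsHeap (t.foldl pvBuildStep (o, e)).2 ∧
      (t.foldl pvBuildStep (o, e)).1.Perm (o ++ t.filter pvOddD) ∧
      (t.foldl pvBuildStep (o, e)).2.Perm (e ++ t.filter (fun d => !pvOddD d)) := by
  induction t generalizing o e with
  | nil => exact ⟨Po, Pe, by simp, by simp⟩
  | cons d t ih =>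
    by_cases hodd : pvOddD d
    · have hstep : pvBuildStep (o, e) d = (pvHeappush o d, e) := by
        rw [pvBuildStep, if_pos (by rw [pv_band_odd]; exact hodd)]
      obtain ⟨hph, hpp⟩ := pvHeappush_heap o d Po
      obtain ⟨i1, i2, i3, i4⟩ := ih (pvHeappush o d) e hph Pe
      refine ⟨by rwa [List.foldl_cons, hstep], by rwa [List.foldl_cons, hstep], ?_, ?_⟩
      · rw [List.foldl_cons, hstep, List.filter_cons, if_pos hodd]
        refine i3.trans ?_
        refine (hpp.append_right _).trans ?_
        exact (List.perm_middle).symm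
      · rw [List.foldl_cons, hstep, List.filter_cons, if_neg (by simp [hodd])]
        exact i4
    · have hstep : pvBuildStep (o, e) d = (o, pvHeappush e d) := by
        rw [pvBuildStep, if_neg (by rw [pv_band_odd]; simpa using hodd)]
      obtain ⟨hph, hpp⟩ := pvHeappush_heap e d Pe
      obtain ⟨i1, i2, i3, i4⟩ := ih o (pvHeappush e d) Po hph
      refine ⟨by rwa [List.foldl_cons, hstep], by rwa [List.foldl_cons, hstep], ?_, ?_⟩
      · rw [List.foldl_cons, hstep, List.filter_cons, if_neg hodd]
        exact i3
      · rw [List.foldl_cons, hstep, List.filter_cons, if_pos (by simp [hodd])]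
        refine i4.trans ?_
        refine (hpp.append_right _).trans ?_
        exact (List.perm_middle).symm

theorem pv_headI_drop (l : List Int) (n : Nat) : (l.drop n).headI = l.getD n 0 := by
  induction l generalizing n with
  | nil => simp
  | cons x t ih => cases n <;> simp [ih]

theorem pv_drop_tail (l : List Int) (n : Nat) : l.tail.drop n = l.drop (n + 1) := by
  cases l <;> simp

theorem pvRev10_append (l : List Int) (d : Int) :
    pvRev10 (l ++ [d]) = pvRev10 l + d * 10 ^ l.length := by
  induction l with
  | nil => simp [pvRev10]
  | cons x t ih => simp [pvRev10, ih]; ring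

theorem pvHorner_eq (l : List Int) (r : Int) :
    pvHorner l r = r * 10 ^ l.length + pvRev10 l.reverse := by
  induction l generalizing r with
  | nil => simp [pvHorner, pvRev10]
  | cons d t ih =>
    rw [pvHorner, List.foldl_cons, ← pvHorner, ih, List.reverse_cons, pvRev10_append]
    simp [List.length_reverse, pow_succ]
    ring

theorem pvLoopB (t OS ES : List Int) (r : Int) (kei koi : Nat) :
    (t.foldl (pvStepB OS ES) (r, (kei : Int), (koi : Int))).1 =
      pvHorner (pvPick t (OS.drop koi) (ES.drop kei)) r := by
  induction t generalizing r kei koi with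
  | nil => simp [pvHorner, pvPick]
  | cons d t ih =>
    by_cases hodd : pvOddD d
    · have hstep : pvStepB OS ES (r, (kei : Int), (koi : Int)) d =
          (r * 10 + (OS.drop koi).headI, (kei : Int), ((koi + 1 : Nat) : Int)) := by
        rw [pvStepB, if_pos (by rw [pvOddD] at hodd; exact hodd)]
        rw [PySem.List.pyGetD_natCast, ← pv_headI_drop]
        push_cast
        rfl
      rw [List.foldl_cons, hstep, ih, pvPick, if_pos hodd, ← pv_drop_tail,
        List.tail_drop, pv_drop_tail]
      rfl
    · have hstep : pvStepB OS ES (r, (kei : Int), (koi : Int)) d =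
          (r * 10 + (ES.drop kei).headI, ((kei + 1 : Nat) : Int), (koi : Int)) := by
        rw [pvStepB, if_neg (by rw [pvOddD] at hodd; simpa using hodd)]
        rw [PySem.List.pyGetD_natCast, ← pv_headI_drop]
        push_cast
        rfl
      rw [List.foldl_cons, hstep, ih, pvPick, if_neg hodd, ← pv_drop_tail,
        List.tail_drop, pv_drop_tail]
      rfl

theorem pvPick_append (u v os es : List Int) :
    pvPick (u ++ v) os es = pvPick u os es ++
      pvPick v (os.drop (u.countP pvOddD)) (es.drop (u.countP (fun d => !pvOddD d))) := by
  induction u generalizing os es with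
  | nil => simp [pvPick]
  | cons d u ih =>
    by_cases hodd : pvOddD d
    · rw [List.cons_append, pvPick, if_pos hodd, pvPick, if_pos hodd, ih,
        List.countP_cons, List.countP_cons]
      simp [hodd]
    · rw [List.cons_append, pvPick, if_neg hodd, pvPick, if_neg hodd, ih,
        List.countP_cons, List.countP_cons]
      simp [hodd]

theorem pvPick_congr (u os1 os2 es1 es2 : List Int)
    (ho : os1.take (u.countP pvOddD) = os2.take (u.countP pvOddD))
    (he : es1.take (u.countP (fun d => !pvOddD d)) = es2.take (u.countP (fun d => !pvOddD d))) :
    pvPick u os1 es1 = pvPick u os2 es2 := by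
  induction u generalizing os1 os2 es1 es2 with
  | nil => rfl
  | cons d u ih =>
    rw [List.countP_cons] at ho
    rw [List.countP_cons] at he
    by_cases hodd : pvOddD d
    · simp only [hodd, Bool.not_true] at ho he
      have ho' : os1.take (u.countP pvOddD + 1) = os2.take (u.countP pvOddD + 1) := by
        simpa using ho
      have he' : es1.take (u.countP (fun d => !pvOddD d)) =
          es2.take (u.countP (fun d => !pvOddD d)) := by simpa using he
      cases os1 with
      | nil =>
        cases os2 with
        | nil => rw [pvPick, pvPick, if_pos hodd, if_pos hodd]
                 exact congrArg _ (ih _ _ _ _ (by simp) he')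
        | cons m2 s2 => simp [List.take_succ_cons] at ho'
      | cons m1 s1 =>
        cases os2 with
        | nil => simp [List.take_succ_cons] at ho'
        | cons m2 s2 =>
          rw [List.take_succ_cons, List.take_succ_cons] at ho'
          obtain ⟨hm, hs⟩ := List.cons.inj ho'
          rw [pvPick, pvPick, if_pos hodd, if_pos hodd]
          simp only [List.headI, List.tail, hm]
          exact congrArg _ (ih _ _ _ _ hs he')
    · simp only [hodd, Bool.not_false] at ho he
      have he' : es1.take (u.countP (fun d => !pvOddD d) + 1) =
          es2.take (u.countP (fun d => !pvOddD d) + 1) := by simpa using he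
      have ho' : os1.take (u.countP pvOddD) = os2.take (u.countP pvOddD) := by simpa using ho
      cases es1 with
      | nil =>
        cases es2 with
        | nil => rw [pvPick, pvPick, if_neg hodd, if_neg hodd]
                 exact congrArg _ (ih _ _ _ _ ho' (by simp))
        | cons m2 s2 => simp [List.take_succ_cons] at he'
      | cons m1 s1 =>
        cases es2 with
        | nil => simp [List.take_succ_cons] at he'
        | cons m2 s2 =>
          rw [List.take_succ_cons, List.take_succ_cons] at he'
          obtain ⟨hm, hs⟩ := List.cons.inj he'
          rw [pvPick, pvPick, if_neg hodd, if_neg hodd]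
          simp only [List.headI, List.tail, hm]
          exact congrArg _ (ih _ _ _ _ ho' hs)

theorem pvPick_rev (t os es : List Int)
    (co : t.countP pvOddD = os.length)
    (ce : t.countP (fun d => !pvOddD d) = es.length) :
    pvPick t.reverse os es = (pvPick t os.reverse es.reverse).reverse := by
  induction t using List.reverseRecOn generalizing os es with
  | nil =>
    have : os = [] := by simpa using co.symm
    subst this
    have : es = [] := by simpa using ce.symm
    subst this
    rfl
  | append_singleton u d ih =>
    rw [List.countP_append] at co ce
    by_cases hodd : pvOddD d
    · have hco : u.countP pvOddD + 1 = os.length := by simpa [hodd] using co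
      have hce : u.countP (fun x => !pvOddD x) = es.length := by simpa [hodd] using ce
      cases os with
      | nil => simp at hco
      | cons m s =>
        simp only [List.length_cons] at hco
        have hrev : (m :: s).reverse = s.reverse ++ [m] := by simp
        -- LHS
        rw [List.reverse_append, List.reverse_singleton, List.singleton_append,
          pvPick, if_pos hodd]
        simp only [List.headI, List.tail]
        rw [ih s es (by omega) hce]
        -- RHS
        rw [pvPick_append, hrev]
        have hdrop_os : (s.reverse ++ [m]).drop (u.countP pvOddD) = [m] := by
          have : u.countP pvOddD = s.reverse.length := by simp; omega
          rw [this, List.drop_left]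
        have hdrop_es : es.reverse.drop (u.countP (fun x => !pvOddD x)) = [] := by
          apply List.drop_eq_nil_of_le
          simp [← hce]
        rw [hdrop_os, hdrop_es, pvPick, if_pos hodd]
        simp only [List.headI]
        rw [pvPick]
        have hcongr : pvPick u (s.reverse ++ [m]) es.reverse = pvPick u s.reverse es.reverse := by
          apply pvPick_congr
          · have h1 : u.countP pvOddD = s.reverse.length := by simp; omega
            rw [h1, List.take_left, List.take_of_length_le (le_refl _)]
          · rfl
        rw [hcongr, List.reverse_append]
        rfl
    · have hco : u.countP pvOddD = os.length := by simpa [hodd] using co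
      have hce : u.countP (fun x => !pvOddD x) + 1 = es.length := by simpa [hodd] using ce
      cases es with
      | nil => simp at hce
      | cons m s =>
        simp only [List.length_cons] at hce
        have hrev : (m :: s).reverse = s.reverse ++ [m] := by simp
        rw [List.reverse_append, List.reverse_singleton, List.singleton_append,
          pvPick, if_neg hodd]
        simp only [List.headI, List.tail]
        rw [ih os s hco (by omega)]
        rw [pvPick_append, hrev]
        have hdrop_es : (s.reverse ++ [m]).drop (u.countP (fun x => !pvOddD x)) = [m] := by
          have : u.countP (fun x => !pvOddD x) = s.reverse.length := by simp; omega
          rw [this, List.drop_left]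
        have hdrop_os : os.reverse.drop (u.countP pvOddD) = [] := by
          apply List.drop_eq_nil_of_le
          simp [← hco]
        rw [hdrop_os, hdrop_es, pvPick, if_neg hodd]
        simp only [List.headI]
        rw [pvPick]
        have hcongr : pvPick u os.reverse (s.reverse ++ [m]) = pvPick u os.reverse s.reverse := by
          apply pvPick_congr
          · rfl
          · have h1 : u.countP (fun x => !pvOddD x) = s.reverse.length := by simp; omega
            rw [h1, List.take_left, List.take_of_length_le (le_refl _)]
        rw [hcongr, List.reverse_append]
        rfl

theorem pvSorted_rev (l : List Int) :
    PySem.List.sorted l (fun x => x) true = (PySem.List.sorted l (fun x => x) false).reverse := by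
  apply List.Perm.eq_of_pairwise (le := fun a b : Int => b ≤ a)
  · intro a b _ _ h1 h2; exact le_antisymm h2 h1
  · exact PySem.List.sorted_pairwise_rev l (fun x => x)
  · exact List.pairwise_reverse.mpr (by simpa using PySem.List.sorted_pairwise l (fun x => x))
  · exact (PySem.List.sorted_perm l _ true).trans (PySem.List.sorted_perm l _ false).symm
      |>.trans (List.reverse_perm _).symm

theorem pv_even_pred : (fun d => PySem.Int.mod d 2 == 0) = (fun d => !pvOddD d) := by
  funext d
  rcases PySem.Int.mod_two_eq d with h | h <;> simp only [pvOddD, h] <;> rfl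

theorem pvMain (num : Int) : largestInteger_heapq num = largestInteger_heapq_alt num := by
  rw [largestInteger_heapq, largestInteger_heapq_alt]
  have harr : (PySem.Int.toStr num).toList.map (fun c => ((c.toNat : Int) - 48)) = pvDigits num := rfl
  set arr := pvDigits num with harrdef
  have hlen : PySem.Str.len (PySem.Int.toStr num) = (arr.length : Int) := by
    rw [PySem.Str.len_eq, harrdef, pvDigits, List.length_map]
  rw [hlen]
  have hrange : PySem.List.pyRange ((arr.length : Int) - 1) (-1) (-1) =
      (PySem.List.pyRange 0 (arr.length : Int) 1).reverse := by
    rw [PySem.List.pyRange_neg_one_eq_reverse]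
    norm_num
  rw [hrange]
  have hfold : ∀ init : (List Int × List Int) × Int × Int,
      ((PySem.List.pyRange 0 (arr.length : Int) 1).reverse).foldl
        (fun s i => pvStepA s (PySem.List.pyGetD arr i 0)) init =
      arr.reverse.foldl pvStepA init := by
    intro init
    conv_rhs => rw [← PySem.List.map_pyGetD_pyRange_zero' arr 0]
    rw [← List.map_reverse, List.foldl_map]
  rw [hfold]
  -- build the two heaps
  have hP0 : pvIsHeap ([] : List Int) := by intro j h1 h2; simp at h2
  obtain ⟨Po, Pe, ho, he⟩ := pvBuild arr [] [] hP0 hP0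
  rw [List.nil_append] at ho he
  set os := PySem.List.sorted (arr.filter pvOddD) (fun x => x) false with hos
  set es := PySem.List.sorted (arr.filter (fun d => !pvOddD d)) (fun x => x) false with hes
  have hoperm : (arr.foldl pvBuildStep ([], [])).1.Perm os :=
    ho.trans (PySem.List.sorted_perm _ _ _).symm
  have heperm : (arr.foldl pvBuildStep ([], [])).2.Perm es :=
    he.trans (PySem.List.sorted_perm _ _ _).symm
  have hso : os.Pairwise (· ≤ ·) := by
    simpa using PySem.List.sorted_pairwise (arr.filter pvOddD) (fun x => x)
  have hse : es.Pairwise (· ≤ ·) := by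
    simpa using PySem.List.sorted_pairwise (arr.filter (fun d => !pvOddD d)) (fun x => x)
  have hco : arr.reverse.countP pvOddD = os.length := by
    rw [hos, PySem.List.length_sorted, List.countP_eq_length_filter, List.filter_reverse,
      List.length_reverse]
  have hce : arr.reverse.countP (fun d => !pvOddD d) = es.length := by
    rw [hes, PySem.List.length_sorted, List.countP_eq_length_filter, List.filter_reverse,
      List.length_reverse]
  rw [pvLoopA arr.reverse _ _ os es 0 1 Po Pe hoperm heperm hso hse hco hce]
  -- B side
  have hpredo : (fun d => PySem.Int.mod d 2 == 1) = pvOddD := rfl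
  rw [hpredo, pv_even_pred]
  rw [pvSorted_rev, pvSorted_rev, ← hos, ← hes]
  have hB : (arr.foldl (pvStepB os.reverse es.reverse) (0, 0, 0)).1 =
      pvHorner (pvPick arr (os.reverse.drop 0) (es.reverse.drop 0)) 0 := by
    have := pvLoopB arr os.reverse es.reverse 0 0 0
    simpa using this
  rw [hB]
  simp only [List.drop_zero]
  rw [pvHorner_eq, ← pvPick_rev arr os es (by simpa using hco) (by simpa using hce)]
  simp

-- ===== VERDICT (by name: the statement is the Claim_ definition above) =====
theorem largestInteger_heapq_spec : Claim_equal_largestInteger_heapq := by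
  intro num _ _
  unfold Spec_largestInteger_heapq
  exact pvMain num
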